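-- pv_equiv track=rewrite | github.com/gkdis6/algorithm | 프로그래머스/2/389479. 서버 증설 횟수/서버 증설 횟수.py | solution
-- ===== SOURCE A (Python) =====
-- def solution(players, m, k):
--     answer = 0
--     len_arr = len(players)
--     arr = [0]*len_arr
--
--     for index,i in enumerate(players):
--         if arr[index] < i//m:
--             cur = arr[index]
--             answer += i//m-cur
--             for j in range(index,min(index+k,len_arr)):
--                 arr[j] += (i//m-cur)
--
--     return answer
-- ===== SOURCE B (Python) =====
-- def solution(players, m, k):
--     # Running active-server counter with a FIFO queue of scheduled expirations.
--     answer = 0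
--     active = 0
--     events = []  # FIFO queue of (expire_index, amount); events[head:] is the live queue
--     head = 0
--     for idx, p in enumerate(players):
--         while head < len(events) and events[head][0] <= idx:
--             active -= events[head][1]
--             head += 1
--         need = p // m
--         if active < need:
--             answer += need - active
--             events.append((idx + k, need - active))
--             active = need
--     return answer
-- ===== Notes on version B (the rewrite author's own statement) =====
-- stated objective: alternative
-- what changed: Replaced A's per-index range updates on a server array by a single running 'active' counter with a FIFO queue of scheduled expirations, each event processed once (O(n) vs O(n*k) worst case, not measurably faster on the generated inputs).
-- outside the precondition, e.g. on solution([5, 3], 0, 2): A raises ZeroDivisionError, B raises ZeroDivisionError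
import Mathlib
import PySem

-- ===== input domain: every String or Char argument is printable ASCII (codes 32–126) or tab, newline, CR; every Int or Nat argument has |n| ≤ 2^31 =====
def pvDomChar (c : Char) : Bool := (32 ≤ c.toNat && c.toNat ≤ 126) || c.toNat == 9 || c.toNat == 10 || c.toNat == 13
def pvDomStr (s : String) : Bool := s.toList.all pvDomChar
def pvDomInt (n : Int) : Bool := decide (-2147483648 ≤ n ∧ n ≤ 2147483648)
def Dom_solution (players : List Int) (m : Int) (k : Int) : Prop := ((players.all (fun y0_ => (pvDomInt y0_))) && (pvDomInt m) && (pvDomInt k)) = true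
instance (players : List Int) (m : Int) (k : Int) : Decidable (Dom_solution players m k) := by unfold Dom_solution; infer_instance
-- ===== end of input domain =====

-- B replaces A's per-index range updates of a server array by a running active counter
-- with a FIFO queue of scheduled expirations (objective: alternative algorithm).

-- ===== PORT A =====
-- step of A's outer for-loop; state = (answer, arr)
def stepA (m k len_arr : Int) (s : Int × List Int) (p : Int × Int) : Int × List Int :=
  let answer := s.1
  let arr := s.2
  let index := p.1
  let i := p.2
  if PySem.List.pyGetD arr index 0 < PySem.Int.floordiv i m then
    let cur := PySem.List.pyGetD arr index 0
    let answer := answer + (PySem.Int.floordiv i m - cur)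
    let arr := (PySem.List.pyRange index (min (index + k) len_arr) 1).foldl
      (fun a j => PySem.List.pySetD a j (PySem.List.pyGetD a j 0 + (PySem.Int.floordiv i m - cur))) arr
    (answer, arr)
  else
    (answer, arr)

def solution (players : List Int) (m : Int) (k : Int) : Int :=
  let len_arr : Int := (players.length : Int)
  let st := (PySem.List.enumerate players).foldl (stepA m k len_arr)
    (0, List.replicate players.length (0 : Int))
  st.1

-- ===== PORT B =====
-- the while-loop: pop expired events (expire index ≤ idx) off the front of the queue
def popExpired (idx : Int) : List (Int × Int) → Int → List (Int × Int) × Int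
  | [], active => ([], active)
  | (e, amt) :: rest, active =>
    if e ≤ idx then popExpired idx rest (active - amt) else ((e, amt) :: rest, active)

-- step of B's for-loop; state = (answer, active, queue)
def stepB (m k : Int) (s : Int × Int × List (Int × Int)) (p : Int × Int) : Int × Int × List (Int × Int) :=
  let idx := p.1
  let pl := p.2
  let qa := popExpired idx s.2.2 s.2.1
  let q := qa.1
  let active := qa.2
  let need := PySem.Int.floordiv pl m
  if active < need then
    (s.1 + (need - active), need, q ++ [(idx + k, need - active)])
  else
    (s.1, active, q)

def solution_alt (players : List Int) (m : Int) (k : Int) : Int :=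
  let st := (PySem.List.enumerate players).foldl (stepB m k) (0, 0, [])
  st.1

-- ===== PRECONDITION & SPEC =====
-- Pre_ excludes only m = 0, where A raises ZeroDivisionError (and so does B).
def Pre_solution (players : List Int) (m : Int) (k : Int) : Prop := m ≠ 0
instance (players : List Int) (m : Int) (k : Int) : Decidable (Pre_solution players m k) := by unfold Pre_solution; infer_instance
def pvWitness_solution : List Int × Int × Int := ([5, 3, 2], 1, 2)

def Spec_solution (players : List Int) (m : Int) (k : Int) (out : Int) : Prop := out = solution_alt players m k
instance (players : List Int) (m : Int) (k : Int) (out : Int) : Decidable (Spec_solution players m k out) := by unfold Spec_solution; infer_instance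

-- ===== CLAIM (what is proved, stated in full; the proofs are below) =====
def Claim_equal_solution : Prop := ∀ (players : List Int) (m : Int) (k : Int), Dom_solution players m k → Pre_solution players m k → Spec_solution players m k (solution players m k)

-- ===== LEMMAS AND PROOFS =====

theorem sum_snd_split (q : List (Int × Int)) (p : Int × Int → Bool) :
    ((q.filter p).map Prod.snd).sum + ((q.filter (fun x => !p x)).map Prod.snd).sum
      = (q.map Prod.snd).sum := by
  induction q with
  | nil => simp
  | cons a q ih =>
    by_cases h : p a = true <;> simp [List.filter, h] <;> omega

theorem pop_spec (idx : Int) (q : List (Int × Int)) (act : Int)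
    (hs : q.Pairwise (fun a b => a.1 ≤ b.1)) :
    popExpired idx q act
      = (q.filter (fun ev => decide (idx < ev.1)),
         act - ((q.filter (fun ev => decide (ev.1 ≤ idx))).map Prod.snd).sum) := by
  induction q generalizing act with
  | nil => simp [popExpired]
  | cons a q ih =>
    obtain ⟨e, amt⟩ := a
    rcases List.pairwise_cons.mp hs with ⟨hall, htail⟩
    by_cases h : e ≤ idx
    · have hne : ¬ idx < e := by omega
      simp only [popExpired, if_pos h]
      rw [ih _ htail]
      simp [h, hne]
      omega
    · have hlt : idx < e := by omega
      have h1 : q.filter (fun ev => decide (idx < ev.1)) = q :=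
        List.filter_eq_self.mpr (fun ev hev => by
          have := hall ev hev; simp; omega)
      have h2 : q.filter (fun ev => decide (ev.1 ≤ idx)) = [] :=
        List.filter_eq_nil_iff.mpr (fun ev hev => by
          have := hall ev hev; simp; omega)
      simp [popExpired, h, hlt, h1, h2]

theorem length_update_range (a b d : Int) (arr : List Int) :
    ((PySem.List.pyRange a b 1).foldl
      (fun ar jj => PySem.List.pySetD ar jj (PySem.List.pyGetD ar jj 0 + d)) arr).length
      = arr.length := by
  induction h : (b - a).toNat generalizing a arr with
  | zero =>
    rw [PySem.List.pyRange_one_eq_nil (by omega)]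
    simp
  | succ n ih =>
    rw [PySem.List.pyRange_one_cons (by omega)]
    simp only [List.foldl_cons]
    rw [ih _ _ (by omega)]
    exact PySem.List.length_pySetD _ _ _

theorem update_range (d : Int) : ∀ (n : Nat) (arr : List Int) (a b j : Int),
    (b - a).toNat = n → 0 ≤ a → 0 ≤ j → b ≤ (arr.length : Int) →
    PySem.List.pyGetD ((PySem.List.pyRange a b 1).foldl
        (fun ar jj => PySem.List.pySetD ar jj (PySem.List.pyGetD ar jj 0 + d)) arr) j 0
      = PySem.List.pyGetD arr j 0 + (if a ≤ j ∧ j < b then d else 0) := by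
  intro n
  induction n with
  | zero =>
    intro arr a b j h h0 hj hb
    rw [PySem.List.pyRange_one_eq_nil (by omega)]
    simp only [List.foldl_nil]
    have : ¬ (a ≤ j ∧ j < b) := by omega
    simp [this]
  | succ n ih =>
    intro arr a b j h h0 hj hb
    have hab : a < b := by omega
    rw [PySem.List.pyRange_one_cons hab]
    simp only [List.foldl_cons]
    have hlen' : ((PySem.List.pySetD arr a (PySem.List.pyGetD arr a 0 + d)).length : Int)
        = (arr.length : Int) := by
      rw [PySem.List.length_pySetD]
    rw [ih _ (a + 1) b j (by omega) (by omega) hj (by rw [hlen']; omega)]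
    have hacast : ((a.toNat : Nat) : Int) = a := Int.toNat_of_nonneg h0
    have hjcast : ((j.toNat : Nat) : Int) = j := Int.toNat_of_nonneg hj
    have h1 : PySem.List.pyGetD
        (PySem.List.pySetD arr ((a.toNat : Nat) : Int) (PySem.List.pyGetD arr a 0 + d))
        ((j.toNat : Nat) : Int) 0
        = if j.toNat = a.toNat
          then PySem.List.pyGetD arr a 0 + d
          else PySem.List.pyGetD arr ((j.toNat : Nat) : Int) 0 :=
      PySem.List.pyGetD_pySetD_natCast _ _ _ _ _ (by omega)
    rw [hacast, hjcast] at h1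
    rw [h1]
    have hnat : j.toNat = a.toNat ↔ j = a := by omega
    simp only [hnat]
    by_cases hja : j = a
    · subst hja
      split_ifs <;> omega
    · simp only [if_neg hja]
      split_ifs <;> omega

theorem pyGetD_replicate_zero (n : Nat) (j : Int) :
    PySem.List.pyGetD (List.replicate n (0 : Int)) j 0 = 0 := by
  simp only [PySem.List.pyGetD, PySem.List.pyGet?, PySem.List.pyIdx?]
  split_ifs <;> simp [List.getElem?_replicate] <;> split_ifs <;> simp

theorem main_inv (m k len_arr : Int) :
    ∀ (rest : List Int) (t ansA act : Int) (arr : List Int) (q : List (Int × Int)),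
    (arr.length : Int) = len_arr →
    0 ≤ t →
    t + (rest.length : Int) = len_arr →
    act = (q.map Prod.snd).sum →
    (∀ j : Int, t ≤ j → j < len_arr →
       PySem.List.pyGetD arr j 0 = ((q.filter (fun ev => decide (j < ev.1))).map Prod.snd).sum) →
    q.Pairwise (fun a b => a.1 ≤ b.1) →
    (∀ ev ∈ q, ev.1 < t + k) →
    ((PySem.List.enumerate rest t).foldl (stepA m k len_arr) (ansA, arr)).1
      = ((PySem.List.enumerate rest t).foldl (stepB m k) (ansA, act, q)).1 := by
  intro rest
  induction rest with
  | nil =>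
    intro t ansA act arr q _ _ _ _ _ _ _
    simp [PySem.List.enumerate]
  | cons p rest ih =>
    intro t ansA act arr q hlen ht htn hact harr hsort hbound
    rw [PySem.List.enumerate_cons]
    simp only [List.foldl_cons]
    have htlen : t < len_arr := by
      have := htn; simp [List.length_cons] at this; omega
    -- the popped queue and active counter on B's side
    set q' : List (Int × Int) := q.filter (fun ev => decide (t < ev.1)) with hq'
    have hpop : popExpired t q act
        = (q', act - ((q.filter (fun ev => decide (ev.1 ≤ t))).map Prod.snd).sum) :=
      pop_spec t q act hsort
    have hfneg : q.filter (fun x => !decide (x.1 ≤ t)) = q' := by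
      apply List.filter_congr
      intro x _
      by_cases hx : x.1 ≤ t <;> simp [hx] <;> omega
    have hact' : act - ((q.filter (fun ev => decide (ev.1 ≤ t))).map Prod.snd).sum
        = (q'.map Prod.snd).sum := by
      have := sum_snd_split q (fun ev => decide (ev.1 ≤ t))
      rw [hfneg] at this
      omega
    have hcur : PySem.List.pyGetD arr t 0 = (q'.map Prod.snd).sum := by
      rw [harr t (le_refl t) htlen]
    have hq'sub : ∀ ev ∈ q', ev ∈ q := fun ev hev => List.mem_of_mem_filter hev
    have hq'sort : q'.Pairwise (fun a b => a.1 ≤ b.1) :=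
      List.Pairwise.sublist (List.filter_sublist) hsort
    have hfilter_eq : ∀ j : Int, t + 1 ≤ j →
        q'.filter (fun ev => decide (j < ev.1)) = q.filter (fun ev => decide (j < ev.1)) := by
      intro j hj
      rw [hq', List.filter_filter]
      apply List.filter_congr
      intro x _
      by_cases hx : j < x.1 <;> simp [hx] <;> omega
    have hstepB : stepB m k (ansA, act, q) (t, p)
        = (let need := PySem.Int.floordiv p m;
           let act' := (q'.map Prod.snd).sum;
           if act' < need then (ansA + (need - act'), need, q' ++ [(t + k, need - act')])
           else (ansA, act', q')) := by
      simp only [stepB, hpop, hact']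
    have hstepA : stepA m k len_arr (ansA, arr) (t, p)
        = (let need := PySem.Int.floordiv p m;
           let cur := (q'.map Prod.snd).sum;
           if cur < need then
             (ansA + (need - cur),
              (PySem.List.pyRange t (min (t + k) len_arr) 1).foldl
                (fun a j => PySem.List.pySetD a j (PySem.List.pyGetD a j 0 + (need - cur))) arr)
           else (ansA, arr)) := by
      simp only [stepA, hcur]
    rw [hstepA, hstepB]
    simp only []
    by_cases hc : (q'.map Prod.snd).sum < PySem.Int.floordiv p m
    · -- servers are added
      rw [if_pos hc, if_pos hc]
      set need := PySem.Int.floordiv p m with hneed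
      set d := need - (q'.map Prod.snd).sum with hd
      set arr2 := (PySem.List.pyRange t (min (t + k) len_arr) 1).foldl
          (fun a j => PySem.List.pySetD a j (PySem.List.pyGetD a j 0 + d)) arr with harr2
      have hlen2 : (arr2.length : Int) = len_arr := by
        rw [harr2, length_update_range, hlen]
      refine ih (t + 1) (ansA + d) need arr2 (q' ++ [(t + k, d)]) hlen2 (by omega)
        (by simp at htn ⊢; omega) ?_ ?_ ?_ ?_
      · -- active = queue sum
        simp
        omega
      · -- array/queue correspondence
        intro j hj hjlen
        have hupd : PySem.List.pyGetD arr2 j 0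
            = PySem.List.pyGetD arr j 0 + (if t ≤ j ∧ j < min (t + k) len_arr then d else 0) :=
          update_range d _ arr t (min (t + k) len_arr) j rfl ht (by omega) (by omega)
        rw [hupd, harr j (by omega) hjlen, List.filter_append,
            ← hfilter_eq j hj]
        by_cases hjk : j < t + k
        · have h1 : [((t + k : Int), d)].filter (fun ev => decide (j < ev.1)) = [(t + k, d)] := by
            simp [hjk]
          have h2 : t ≤ j ∧ j < min (t + k) len_arr := by omega
          simp [h1, h2]
        · have h1 : [((t + k : Int), d)].filter (fun ev => decide (j < ev.1)) = [] := by
            simp; omega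
          have h2 : ¬ (t ≤ j ∧ j < min (t + k) len_arr) := by omega
          simp [h1]
          omega
      · -- sortedness
        rw [List.pairwise_append]
        refine ⟨hq'sort, by simp, ?_⟩
        intro a ha b hb
        simp at hb
        have := hbound a (hq'sub a ha)
        rw [hb]
        omega
      · -- expiry bound
        intro ev hev
        rcases List.mem_append.mp hev with h | h
        · have := hbound ev (hq'sub ev h); omega
        · rw [List.mem_singleton] at h
          subst h
          show t + k < t + 1 + k
          omega
    · -- no servers added
      rw [if_neg hc, if_neg hc]
      refine ih (t + 1) ansA ((q'.map Prod.snd).sum) arr q' hlen (by omega)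
        (by simp at htn ⊢; omega) rfl ?_ ?_ ?_
      · intro j hj hjlen
        rw [harr j (by omega) hjlen, hfilter_eq j hj]
      · exact hq'sort
      · intro ev hev
        have := hbound ev (hq'sub ev hev)
        omega

-- ===== VERDICT (by name: the statement is the Claim_ definition above) =====
theorem solution_spec : Claim_equal_solution := by
  intro players m k hdom hpre
  unfold Spec_solution solution solution_alt
  simp only []
  apply main_inv m k (players.length : Int) players 0 0 0
      (List.replicate players.length (0 : Int)) []
  · simp
  · omega
  · simp
  · simp
  · intro j _ _
    simp [pyGetD_replicate_zero]
  · exact List.Pairwise.nil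
  · intro ev hev
    simp at hev
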